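-- pv_equiv track=rewrite | github.com/MuUsman65/password-strength-checker | rules.py | repeat_character_penalty
-- ===== SOURCE A (Python) =====
-- def repeat_character_penalty(password: str):
--     points = 0
--     penalty = 0
--     positives = []
--     negatives = []
--
--     has_three_consecutive = False
--
--     for i in range(len(password) - 2):
--         if password[i] == password[i+1] == password[i+2]:
--             has_three_consecutive = True
--             break
--
--     if has_three_consecutive:
--         penalty = 10
--         negatives.append("Has 3 or more identical characters in a row!")
--
--     return points, penalty, positives, negatives
-- ===== SOURCE B (Python) =====
-- def repeat_character_penalty(password: str):
--     # Run-length scan: track the current run of equal characters and the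
--     # longest run seen; a triple exists iff the longest run is >= 3.
--     longest = 0
--     run = 0
--     prev = None
--     for ch in password:
--         run = run + 1 if ch == prev else 1
--         prev = ch
--         if run > longest:
--             longest = run
--     penalty = 10 if longest >= 3 else 0
--     negatives = ["Has 3 or more identical characters in a row!"] if penalty else []
--     return 0, penalty, [], negatives
-- ===== Notes on version B (the rewrite author's own statement) =====
-- stated objective: alternative
-- what changed: Replaced A's indexed triple-comparison scan with an early break by a run-length pass that maintains the current run of equal characters and the maximum run, deciding the penalty by longest >= 3.
import Mathlib
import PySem

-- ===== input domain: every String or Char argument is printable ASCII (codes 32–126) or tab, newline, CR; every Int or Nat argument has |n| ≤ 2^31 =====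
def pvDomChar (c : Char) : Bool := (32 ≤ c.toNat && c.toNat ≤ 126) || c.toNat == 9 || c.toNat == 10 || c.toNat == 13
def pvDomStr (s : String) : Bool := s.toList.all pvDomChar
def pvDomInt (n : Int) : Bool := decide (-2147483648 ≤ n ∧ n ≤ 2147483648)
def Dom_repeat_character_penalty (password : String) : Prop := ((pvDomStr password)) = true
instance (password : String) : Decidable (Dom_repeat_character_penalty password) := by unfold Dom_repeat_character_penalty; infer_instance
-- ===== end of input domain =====

-- B replaces A's indexed triple-comparison scan (with break flag) by a run-length pass
-- maintaining the current and maximum run of equal characters; objective: alternative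
-- single-pass algorithm of the same cost.

-- ===== PORT A =====
-- A's `for i in range(len(password)-2)` loop with break: recursion over the index list;
-- the out-of-range arm of the match is unreachable (indices come from the range).
def pvALoop (cs : List Char) : List Int → Bool
  | [] => false
  | i :: rest =>
    match PySem.List.pyGet? cs i, PySem.List.pyGet? cs (i + 1), PySem.List.pyGet? cs (i + 2) with
    | some a, some b, some c => if a = b ∧ b = c then true else pvALoop cs rest
    | _, _, _ => false

def repeat_character_penalty (password : String) : Int × Int × List String × List String :=
  let cs := password.toList
  let has_three_consecutive :=
    pvALoop cs (PySem.List.pyRange 0 ((cs.length : Int) - 2) 1)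
  if has_three_consecutive then
    (0, 10, [], ["Has 3 or more identical characters in a row!"])
  else
    (0, 0, [], [])

-- ===== PORT B =====
-- B's loop body: run = run+1 if ch == prev else 1; prev = ch; if run > longest: longest = run.
-- State is (longest, run, prev); prev starts as None (Option Char).
def pvBStep (st : Int × Int × Option Char) (ch : Char) : Int × Int × Option Char :=
  let run := if st.2.2 = some ch then st.2.1 + 1 else 1
  let longest := if run > st.1 then run else st.1
  (longest, run, some ch)

def repeat_character_penalty_alt (password : String) : Int × Int × List String × List String :=
  let st := password.toList.foldl pvBStep (0, 0, none)
  let penalty : Int := if st.1 ≥ 3 then 10 else 0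
  let negatives := if penalty ≠ 0 then ["Has 3 or more identical characters in a row!"] else []
  (0, penalty, [], negatives)

-- ===== PRECONDITION & SPEC =====
def Spec_repeat_character_penalty (password : String) (out : Int × Int × List String × List String) : Prop := out = repeat_character_penalty_alt password
instance (password : String) (out : Int × Int × List String × List String) : Decidable (Spec_repeat_character_penalty password out) := by unfold Spec_repeat_character_penalty; infer_instance

-- ===== CLAIM (what is proved, stated in full; the proofs are below) =====
def Claim_equal_repeat_character_penalty : Prop := ∀ (password : String), Dom_repeat_character_penalty password → Spec_repeat_character_penalty password (repeat_character_penalty password)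

-- ===== LEMMAS AND PROOFS =====

-- Proof-only helper: "some window of three consecutive equal characters" as a structural scan.
def pvTriple : List Char → Bool
  | a :: b :: c :: rest => (a = b && b = c) || pvTriple (b :: c :: rest)
  | _ => false

theorem pvTriple_cons3 (a b c : Char) (rest : List Char) :
    pvTriple (a :: b :: c :: rest) = ((a = b && b = c) || pvTriple (b :: c :: rest)) := rfl

-- A's scan starting at index pre.length over pre ++ suf equals the triple scan of the suffix.
theorem pvLoop_eq (suf pre : List Char) :
    pvALoop (pre ++ suf) (PySem.List.pyRange (pre.length : Int) (((pre ++ suf).length : Int) - 2) 1)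
      = pvTriple suf := by
  induction suf generalizing pre with
  | nil =>
    rw [PySem.List.pyRange_one_eq_nil (by simp)]
    rfl
  | cons a tl ih =>
    match tl with
    | [] =>
      rw [PySem.List.pyRange_one_eq_nil (by simp)]
      rfl
    | [b] =>
      rw [PySem.List.pyRange_one_eq_nil (by simp)]
      rfl
    | b :: c :: rest =>
      rw [PySem.List.pyRange_one_cons (by simp; omega)]
      have h0 : PySem.List.pyGet? (pre ++ a :: b :: c :: rest) (pre.length : Int) = some a :=
        PySem.List.pyGet?_append_length _ _ _
      have h1 : PySem.List.pyGet? (pre ++ a :: b :: c :: rest) ((pre.length : Int) + 1) = some b := by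
        have := PySem.List.pyGet?_append_length (pre := pre ++ [a]) (y := b) (ys := c :: rest)
        simpa using this
      have h2 : PySem.List.pyGet? (pre ++ a :: b :: c :: rest) ((pre.length : Int) + 2) = some c := by
        have := PySem.List.pyGet?_append_length (pre := pre ++ [a, b]) (y := c) (ys := rest)
        have e : ((pre ++ [a, b]).length : Int) = (pre.length : Int) + 2 := by simp
        rw [e] at this
        simpa using this
      unfold pvALoop
      rw [h0, h1, h2]
      show (if a = b ∧ b = c then true
            else pvALoop (pre ++ a :: b :: c :: rest)
              (PySem.List.pyRange ((pre.length : Int) + 1) (((pre ++ a :: b :: c :: rest).length : Int) - 2) 1))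
          = pvTriple (a :: b :: c :: rest)
      have ihe := ih (pre := pre ++ [a])
      have e1 : (((pre ++ [a]) ++ b :: c :: rest).length : Int) = ((pre ++ a :: b :: c :: rest).length : Int) := by simp
      have e2 : ((pre ++ [a]).length : Int) = (pre.length : Int) + 1 := by simp
      rw [e1, e2, List.append_assoc] at ihe
      simp only [List.singleton_append] at ihe
      by_cases hab : a = b ∧ b = c
      · simp [hab.1, hab.2, pvTriple_cons3]
      · rw [if_neg hab, ihe, pvTriple_cons3]
        have hf : (decide (a = b) && decide (b = c)) = false := by
          by_cases h : a = b <;> by_cases h' : b = c <;> simp_all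
        rw [hf, Bool.false_or]

theorem pvHas_eq (cs : List Char) :
    pvALoop cs (PySem.List.pyRange 0 ((cs.length : Int) - 2) 1) = pvTriple cs := by
  simpa using pvLoop_eq cs []

-- The tracked maximum only grows along the fold.
theorem pvFold_mono (cs : List Char) (st : Int × Int × Option Char) :
    st.1 ≤ (cs.foldl pvBStep st).1 := by
  induction cs generalizing st with
  | nil => exact le_refl _
  | cons c t ih =>
    refine le_trans ?_ (ih (pvBStep st c))
    simp only [pvBStep]
    split <;> omega

-- Core run-length lemma: from a state whose last char is p (run 1) resp. last two chars
-- are p (run 2), the final maximum reaches 3 iff the triple scan of the carried list fires.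
theorem pvRun_key (cs : List Char) :
    ∀ (p : Char) (L : Int), L < 3 →
      ((3 ≤ (cs.foldl pvBStep (L, 1, some p)).1) ↔ pvTriple (p :: cs) = true) ∧
      ((3 ≤ (cs.foldl pvBStep (L, 2, some p)).1) ↔ pvTriple (p :: p :: cs) = true) := by
  induction cs with
  | nil =>
    intro p L hL
    constructor <;> simp [pvTriple] <;> omega
  | cons c t ih =>
    intro p L hL
    constructor
    · -- run = 1 state
      by_cases hc : c = p
      · subst hc
        have step : pvBStep (L, 1, some c) c = ((if 2 > L then 2 else L), 2, some c) := by
          simp [pvBStep]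
        rw [List.foldl_cons, step]
        have hL' : (if 2 > L then (2:Int) else L) < 3 := by split <;> omega
        exact (ih c _ hL').2
      · have hc' : p ≠ c := fun h => hc h.symm
        have step : pvBStep (L, 1, some p) c = ((if 1 > L then 1 else L), 1, some c) := by
          simp [pvBStep, hc']
        rw [List.foldl_cons, step]
        have hL' : (if 1 > L then (1:Int) else L) < 3 := by split <;> omega
        have h1 := (ih c _ hL').1
        rw [h1]
        cases t with
        | nil => simp [pvTriple]
        | cons x r => simp [pvTriple_cons3, hc']
    · -- run = 2 state
      by_cases hc : c = p
      · subst hc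
        have step : pvBStep (L, 2, some c) c = (3, 3, some c) := by
          simp [pvBStep]
          omega
        rw [List.foldl_cons, step]
        have hm : (3:Int) ≤ (List.foldl pvBStep (3, 3, some c) t).1 := pvFold_mono t (3, 3, some c)
        simp [hm, pvTriple_cons3]
      · have hc' : p ≠ c := fun h => hc h.symm
        have step : pvBStep (L, 2, some p) c = ((if 1 > L then 1 else L), 1, some c) := by
          simp [pvBStep, hc']
        rw [List.foldl_cons, step]
        have hL' : (if 1 > L then (1:Int) else L) < 3 := by split <;> omega
        have h1 := (ih c _ hL').1
        rw [h1]
        cases t with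
        | nil => simp [pvTriple, hc']
        | cons x r => simp [pvTriple_cons3, hc']

-- B's fold reaches maximum ≥ 3 exactly when a triple of consecutive equal chars exists.
theorem pvFold_triple (cs : List Char) :
    (3 ≤ (cs.foldl pvBStep (0, 0, none)).1) ↔ pvTriple cs = true := by
  cases cs with
  | nil => simp [pvTriple]
  | cons c t =>
    have step : pvBStep (0, 0, none) c = (1, 1, some c) := by simp [pvBStep]
    rw [List.foldl_cons, step]
    exact (pvRun_key t c 1 (by norm_num)).1

-- ===== VERDICT (by name: the statement is the Claim_ definition above) =====
theorem repeat_character_penalty_spec : Claim_equal_repeat_character_penalty := by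
  intro password _
  unfold Spec_repeat_character_penalty repeat_character_penalty repeat_character_penalty_alt
  simp only [pvHas_eq]
  by_cases h : pvTriple password.toList = true
  · have h3 : 3 ≤ (password.toList.foldl pvBStep (0, 0, none)).1 := (pvFold_triple _).2 h
    simp [h, h3]
  · have h3 : ¬ 3 ≤ (password.toList.foldl pvBStep (0, 0, none)).1 := by
      rw [pvFold_triple]; exact h
    simp only [Bool.not_eq_true] at h
    simp [h, h3]
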